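-- pv_equiv track=rewrite | github.com/ChenyangGao/web-mount-packs | python-module/temp/python-texttools/texttools/string.py | substring_index
-- ===== SOURCE A (Python) =====
-- def substring_index(string, delimiter, count):
--     if count == 0:
--         return ''
--     elif count > 0:
--         end = -1
--         for i in range(count):
--             end = string.find(delimiter, end+1)
--             if end == -1:
--                 return string
--         else:
--             return string[:end]
--     else:
--         start = None
--         for i in range(-count):
--             start = string.rfind(delimiter, 0, start)
--             if start == -1:
--                 return string
--         else:
--             return string[start+1:]
-- ===== SOURCE B (Python) =====
-- def substring_index(string, delimiter, count):
--     if count == 0: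
--         return ''
--     n, m = len(string), len(delimiter)
--     # all (possibly overlapping) match positions, computed once
--     occ = [i for i in range(n - m + 1) if string[i:i+m] == delimiter]
--     if count > 0:
--         if count > len(occ):
--             return string
--         return string[:occ[count - 1]]
--     bound = n
--     for _ in range(-count):
--         p = next((q for q in reversed(occ) if q + m <= bound), -1)
--         if p < 0:
--             return string
--         bound = p
--     return string[bound + 1:]
-- ===== Notes on version B (the rewrite author's own statement) =====
-- stated objective: alternative
-- what changed: A repeatedly rescans the string with find/rfind inside a loop; B precomputes the list of all (overlapping) delimiter match positions once, then answers count>0 by direct indexing into that list and count<0 by walking the list from the right, slicing once at the end.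
import Mathlib
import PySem

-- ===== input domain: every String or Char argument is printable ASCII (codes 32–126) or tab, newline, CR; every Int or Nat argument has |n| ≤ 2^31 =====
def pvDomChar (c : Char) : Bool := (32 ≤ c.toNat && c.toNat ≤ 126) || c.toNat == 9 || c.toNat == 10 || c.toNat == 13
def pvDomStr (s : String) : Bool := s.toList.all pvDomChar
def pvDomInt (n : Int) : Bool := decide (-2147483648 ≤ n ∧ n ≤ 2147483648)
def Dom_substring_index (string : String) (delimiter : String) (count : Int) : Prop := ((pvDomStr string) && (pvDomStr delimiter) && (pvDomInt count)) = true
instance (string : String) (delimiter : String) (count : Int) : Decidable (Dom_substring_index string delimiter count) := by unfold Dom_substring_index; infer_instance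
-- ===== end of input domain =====

-- B replaces A's repeated find/rfind rescans by one precomputed list of all match positions,
-- indexed directly for count>0 and scanned from the right for count<0 (objective: alternative).

-- ===== PORT A =====
-- for i in range(count): end = string.find(delimiter, end+1); if end == -1: return string / else: return string[:end]
def aFindLoop (s d : String) : Nat → Int → String
  | 0, e => PySem.Str.slice s none (some e)
  | k+1, e =>
      let e' := PySem.Str.findFrom s d (e + 1)
      if e' = -1 then s else aFindLoop s d k e'

-- for i in range(-count): start = string.rfind(delimiter, 0, start); if start == -1: return string / else: return string[start+1:]
def aRFindLoop (s d : String) : Nat → Option Int → String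
  | 0, st =>
      match st with
      | some v => PySem.Str.slice s (some (v + 1)) none
      | none => s   -- unreachable: the loop body runs at least once before the final slice
  | k+1, st =>
      let v := PySem.Str.rfindFrom s d 0 st
      if v = -1 then s else aRFindLoop s d k (some v)

def substring_index (string : String) (delimiter : String) (count : Int) : String :=
  if count = 0 then ""
  else if count > 0 then aFindLoop string delimiter count.toNat (-1)
  else aRFindLoop string delimiter (-count).toNat none

-- ===== PORT B =====
-- occ = [i for i in range(n - m + 1) if string[i:i+m] == delimiter]
def bOcc (string delimiter : String) : List Int :=
  (PySem.List.pyRange 0 (PySem.Str.len string - PySem.Str.len delimiter + 1)).filter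
    (fun i => PySem.Str.slice string (some i) (some (i + PySem.Str.len delimiter)) == delimiter)

-- for _ in range(-count): p = next((q for q in reversed(occ) if q + m <= bound), -1); if p < 0: return string; bound = p
def bNegLoop (s : String) (occ : List Int) (m : Int) : Nat → Int → String
  | 0, bound => PySem.Str.slice s (some (bound + 1)) none
  | k+1, bound =>
      match occ.reverse.find? (fun q => q + m ≤ bound) with
      | none => s
      | some p => bNegLoop s occ m k p

def substring_index_alt (string : String) (delimiter : String) (count : Int) : String :=
  if count = 0 then ""
  else
    let occ := bOcc string delimiter
    if count > 0 then
      if count > (occ.length : Int) then string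
      else
        match occ[(count - 1).toNat]? with
        | some p => PySem.Str.slice string none (some p)
        | none => string   -- unreachable: count ≤ len(occ)
    else bNegLoop string occ (PySem.Str.len delimiter) (-count).toNat (PySem.Str.len string)

-- ===== PRECONDITION & SPEC =====
def Spec_substring_index (string : String) (delimiter : String) (count : Int) (out : String) : Prop := out = substring_index_alt string delimiter count
instance (string : String) (delimiter : String) (count : Int) (out : String) : Decidable (Spec_substring_index string delimiter count out) := by unfold Spec_substring_index; infer_instance

-- ===== CLAIM (what is proved, stated in full; the proofs are below) =====
def Claim_equal_substring_index : Prop := ∀ (string : String) (delimiter : String) (count : Int), Dom_substring_index string delimiter count → Spec_substring_index string delimiter count (substring_index string delimiter count)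

-- ===== LEMMAS AND PROOFS =====

-- all (possibly overlapping) positions where delimiter matches in string, ascending
def OCC (S D : List Char) : List Nat :=
  (List.range (S.length + 1)).filter (fun p => decide (D <+: S.drop p))

theorem OCC_pairwise (S D : List Char) : (OCC S D).Pairwise (· < ·) := List.Pairwise.sublist List.filter_sublist List.pairwise_lt_range

theorem mem_OCC {S D : List Char} {p : Nat} :
    p ∈ OCC S D ↔ p ≤ S.length ∧ D <+: S.drop p := by
  simp [OCC, List.mem_filter, List.mem_range]

-- find? on a strictly ascending list returns the minimum satisfying element
theorem find?_min {q : Nat → Bool} : ∀ {L : List Nat} {r : Nat},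
    L.Pairwise (· < ·) → r ∈ L → q r = true → (∀ p ∈ L, q p = true → r ≤ p) →
    L.find? q = some r := by
  intro L
  induction L with
  | nil => intro r _ hr; cases hr
  | cons a t ih =>
      intro r hs hr hq hmin
      obtain ⟨ha, ht⟩ := List.pairwise_cons.mp hs
      by_cases hqa : q a = true
      · have har : r ≤ a := hmin a (List.mem_cons_self) hqa
        have : a = r := by
          rcases List.mem_cons.mp hr with h | h
          · exact h.symm
          · exact absurd (ha r h) (by omega)
        subst this; simp [hq]
      · have hrt : r ∈ t := by
          rcases List.mem_cons.mp hr with h | h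
          · exact absurd (h ▸ hq) hqa
          · exact h
        rw [List.find?_cons_of_neg hqa]
        exact ih ht hrt hq (fun p hp hqp => hmin p (List.mem_cons_of_mem _ hp) hqp)

-- find? on a strictly descending list returns the maximum satisfying element
theorem find?_max {q : Nat → Bool} : ∀ {L : List Nat} {r : Nat},
    L.Pairwise (· > ·) → r ∈ L → q r = true → (∀ p ∈ L, q p = true → p ≤ r) →
    L.find? q = some r := by
  intro L
  induction L with
  | nil => intro r _ hr; cases hr
  | cons a t ih =>
      intro r hs hr hq hmax
      obtain ⟨ha, ht⟩ := List.pairwise_cons.mp hs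
      by_cases hqa : q a = true
      · have har : a ≤ r := hmax a (List.mem_cons_self) hqa
        have : a = r := by
          rcases List.mem_cons.mp hr with h | h
          · exact h.symm
          · exact absurd (ha r h) (by omega)
        subst this; simp [hq]
      · have hrt : r ∈ t := by
          rcases List.mem_cons.mp hr with h | h
          · exact absurd (h ▸ hq) hqa
          · exact h
        rw [List.find?_cons_of_neg hqa]
        exact ih ht hrt hq (fun p hp hqp => hmax p (List.mem_cons_of_mem _ hp) hqp)

-- a successful find? on a strictly descending list IS the maximum satisfying element
theorem find?_max_of_eq_some {q : Nat → Bool} : ∀ {L : List Nat} {r : Nat},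
    L.Pairwise (· > ·) → L.find? q = some r →
    ∀ p ∈ L, q p = true → p ≤ r := by
  intro L
  induction L with
  | nil => intro r _ h; simp at h
  | cons a t ih =>
      intro r hs h p hp hqp
      obtain ⟨ha, ht⟩ := List.pairwise_cons.mp hs
      by_cases hqa : q a = true
      · rw [List.find?_cons_of_pos hqa] at h
        obtain rfl : a = r := by simpa using h
        rcases List.mem_cons.mp hp with h | h
        · omega
        · exact le_of_lt (ha p h)
      · rw [List.find?_cons_of_neg hqa] at h
        rcases List.mem_cons.mp hp with h' | h'
        · exact absurd (h' ▸ hqp) hqa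
        · exact ih ht h p h' hqp

-- find? is the head of the filtered list
theorem find?_eq_head?_filter {α : Type} (q : α → Bool) : ∀ (L : List α),
    L.find? q = (L.filter q).head? := by
  intro L
  induction L with
  | nil => rfl
  | cons a t ih =>
      by_cases hqa : q a = true
      · rw [List.find?_cons_of_pos hqa, List.filter_cons_of_pos hqa]; rfl
      · rw [List.find?_cons_of_neg hqa, List.filter_cons_of_neg hqa, ih]

-- characterisation of A's find(d, k): the first occurrence ≥ k
theorem findFrom_occ (s d : String) (k : Nat) :
    PySem.Str.findFrom s d (k : Int) =
      match (OCC s.toList d.toList).find? (fun p => decide (k ≤ p)) with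
      | some p => (p : Int)
      | none => -1 := by
  rw [PySem.Str.findFrom_eq]
  by_cases hk : k ≤ s.toList.length
  · by_cases h : PySem.Chars.findFrom s.toList d.toList (k : Int) = -1
    · have hni : ¬ d.toList <:+: s.toList.drop k :=
        (PySem.Chars.findFrom_natCast_eq_neg_one_iff s.toList d.toList k hk).mp h
      have hfn : (OCC s.toList d.toList).find? (fun p => decide (k ≤ p)) = none := by
        rw [List.find?_eq_none]
        intro p hp hkp
        obtain ⟨hpn, hpre⟩ := mem_OCC.mp hp
        have hk2 : k ≤ p := by simpa using hkp
        refine hni (List.infix_iff_prefix_suffix.mpr ⟨(s.toList.drop k).drop (p - k), ?_, List.drop_suffix _ _⟩)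
        rwa [List.drop_drop, show k + (p - k) = p by omega]
      rw [hfn, h]
    · obtain ⟨hge, hpre, hmin⟩ := PySem.Chars.findFrom_natCast_spec s.toList d.toList k hk h
      have h0 : (0:Int) ≤ PySem.Chars.findFrom s.toList d.toList (k : Int) :=
        le_trans (by omega) hge
      have hcast : PySem.Chars.findFrom s.toList d.toList (k : Int) =
          ((PySem.Chars.findFrom s.toList d.toList (k : Int)).toNat : Int) :=
        (Int.toNat_of_nonneg h0).symm
      set r := (PySem.Chars.findFrom s.toList d.toList (k : Int)).toNat with hrdef
      have hrle : r ≤ s.toList.length := by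
        have heq := PySem.Chars.findFrom_natCast s.toList d.toList k hk
        by_cases hc : PySem.Chars.find (s.toList.drop k) d.toList = -1
        · rw [heq, if_pos hc] at h; exact absurd rfl h
        · have hfl := PySem.Chars.find_le_length (s.toList.drop k) d.toList
          rw [List.length_drop] at hfl
          rw [heq, if_neg hc] at hcast
          have hnk : ((s.toList.length - k : Nat) : Int) = (s.toList.length : Int) - k :=
            by omega
          omega
      have hmem : r ∈ OCC s.toList d.toList := mem_OCC.mpr ⟨hrle, hpre⟩
      have hq : decide (k ≤ r) = true := by simp; omega
      have hfind : (OCC s.toList d.toList).find? (fun p => decide (k ≤ p)) = some r := by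
        refine find?_min (OCC_pairwise _ _) hmem hq ?_
        intro p hp hqp
        have hkp : k ≤ p := by simpa using hqp
        by_contra hlt
        exact hmin p hkp (by omega) (mem_OCC.mp hp).2
      rw [hfind, hcast]
  · have hn : PySem.Chars.findFrom s.toList d.toList (k : Int) = -1 := by
      simp only [PySem.Chars.findFrom]
      rw [if_neg (by omega : ¬ (k:Int) < 0), if_pos (by exact_mod_cast Nat.lt_of_not_le hk)]
    have hfn : (OCC s.toList d.toList).find? (fun p => decide (k ≤ p)) = none := by
      rw [List.find?_eq_none]
      intro p hp hkp
      have := (mem_OCC.mp hp).1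
      simp at hkp
      omega
    rw [hfn, hn]

-- characterisation of rfind.go: the last position ≤ j where sub matches
theorem rfind_go_eq (t D : List Char) : ∀ (j : Nat),
    PySem.Chars.rfind.go t D j =
      match (List.range (j+1)).reverse.find? (fun i => decide (D <+: t.drop i)) with
      | some i => (i : Int)
      | none => -1 := by
  intro j
  induction j with
  | zero =>
      show (if D.isPrefixOf t then (0:Int) else -1) = _
      rw [show List.range 1 = [0] from rfl]
      by_cases h : D <+: t
      · simp [h, List.isPrefixOf_iff_prefix.mpr h]
      · simp [h]
  | succ n ih =>
      show (if D.isPrefixOf (t.drop (n+1)) then ((n+1 : Nat) : Int) else PySem.Chars.rfind.go t D n) = _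
      rw [List.range_succ (n := n+1), List.reverse_append]
      simp only [List.reverse_cons, List.reverse_nil, List.nil_append, List.singleton_append,
        List.find?_cons]
      by_cases h : D <+: t.drop (n+1)
      · simp [List.isPrefixOf_iff_prefix.mpr h, h]
      · rw [if_neg (fun hc => h (List.isPrefixOf_iff_prefix.mp hc)),
          show decide (D <+: List.drop (n+1) t) = false by simpa using h]
        exact ih

-- characterisation of A's rfind(d, 0, b): the last occurrence p with p + |d| ≤ b
-- reduction of rfind(d, 0, b) to the bare right-to-left scan over string[:b]
theorem rfindFrom_reduce (S D : List Char) (b : Nat) (hb : b ≤ S.length) (e? : Option Int)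
    (he : (e? = none ∧ b = S.length) ∨ e? = some (b : Int)) :
    PySem.Chars.rfindFrom S D 0 e? =
      (if PySem.Chars.rfind (S.take b) D = -1 then -1 else PySem.Chars.rfind (S.take b) D) := by
  rcases he with ⟨he1, he2⟩ | he1
  · subst he1
    simp only [PySem.Chars.rfindFrom]
    rw [if_neg (by omega : ¬ (0:Int) < 0), if_neg (by omega : ¬ (S.length:Int) < 0)]
    have : (S.length : Int).toNat = S.length := by omega
    rw [this, he2, List.take_of_length_le (by omega)]
    simp only [Int.toNat_zero, List.drop_zero]
    split_ifs <;> simp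
  · subst he1
    simp only [PySem.Chars.rfindFrom]
    rw [if_neg (by omega : ¬ (S.length:Int) < (b:Int)), if_neg (by omega : ¬ (b:Int) < 0),
      if_neg (by omega : ¬ (0:Int) < 0), if_neg (by omega : ¬ (b:Int) < 0)]
    simp only [Int.toNat_zero, Int.toNat_natCast, List.drop_zero]
    split_ifs <;> omega

theorem rfindFrom_occ (s d : String) (b : Nat) (hb : b ≤ s.toList.length) (e? : Option Int)
    (he : (e? = none ∧ b = s.toList.length) ∨ e? = some (b : Int)) :
    PySem.Str.rfindFrom s d 0 e? =
      match (OCC s.toList d.toList).reverse.find? (fun p => decide (p + d.toList.length ≤ b)) with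
      | some p => (p : Int)
      | none => -1 := by
  rw [PySem.Str.rfindFrom_eq, rfindFrom_reduce s.toList d.toList b hb e? he]
  have hlen : (s.toList.take b).length = b := by
    rw [List.length_take]; omega
  have hgo : PySem.Chars.rfind (s.toList.take b) d.toList =
      match (List.range (b+1)).reverse.find?
          (fun i => decide (d.toList <+: (s.toList.take b).drop i)) with
      | some i => (i : Int)
      | none => -1 := by
    show PySem.Chars.rfind.go _ _ (s.toList.take b).length = _
    rw [hlen]
    exact rfind_go_eq _ _ b
  have hpred : ∀ i : Nat, i ≤ b →
      (d.toList <+: (s.toList.take b).drop i ↔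
        d.toList <+: s.toList.drop i ∧ i + d.toList.length ≤ b) := by
    intro i hi
    rw [List.drop_take, List.prefix_take_iff]
    constructor
    · rintro ⟨h1, h2⟩; exact ⟨h1, by omega⟩
    · rintro ⟨h1, h2⟩; exact ⟨h1, by omega⟩
  have hkey : (List.range (b+1)).reverse.find?
        (fun i => decide (d.toList <+: (s.toList.take b).drop i)) =
      (OCC s.toList d.toList).reverse.find? (fun p => decide (p + d.toList.length ≤ b)) := by
    cases h2 : (OCC s.toList d.toList).reverse.find? (fun p => decide (p + d.toList.length ≤ b)) with
    | some p =>
        have hpmem : p ∈ OCC s.toList d.toList := List.mem_reverse.mp (List.mem_of_find?_eq_some h2)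
        have hqp : p + d.toList.length ≤ b := by simpa using List.find?_some h2
        have hmax := find?_max_of_eq_some (List.pairwise_reverse.mpr (OCC_pairwise _ _)) h2
        refine find?_max (List.pairwise_reverse.mpr List.pairwise_lt_range) ?_ ?_ ?_
        · rw [List.mem_reverse, List.mem_range]; omega
        · simpa using (hpred p (by omega)).mpr ⟨(mem_OCC.mp hpmem).2, hqp⟩
        · intro i hi hqi
          have hib : i ≤ b := by
            rw [List.mem_reverse, List.mem_range] at hi; omega
          obtain ⟨hp1, hp2⟩ := (hpred i hib).mp (by simpa using hqi)
          exact hmax i (List.mem_reverse.mpr (mem_OCC.mpr ⟨by omega, hp1⟩)) (by simpa using hp2)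
    | none =>
        rw [List.find?_eq_none] at h2
        rw [List.find?_eq_none]
        intro i hi hqi
        have hib : i ≤ b := by
          rw [List.mem_reverse, List.mem_range] at hi; omega
        obtain ⟨hp1, hp2⟩ := (hpred i hib).mp (by simpa using hqi)
        exact h2 i (List.mem_reverse.mpr (mem_OCC.mpr ⟨by omega, hp1⟩)) (by simpa using hp2)
  rw [hgo, hkey]
  cases (OCC s.toList d.toList).reverse.find? (fun p => decide (p + d.toList.length ≤ b)) with
  | some p => simp
  | none => simp

theorem pyRange_zero_natCast (k : Nat) :
    PySem.List.pyRange 0 (k : Int) = (List.range k).map Nat.cast := by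
  induction k with
  | zero => rw [PySem.List.pyRange_one_eq_nil (by omega)]; simp
  | succ n ih =>
      rw [show ((n+1 : Nat) : Int) = (n : Int) + 1 by push_cast; ring,
        PySem.List.pyRange_one_succ_right (by positivity), ih, List.range_succ]
      simp

theorem bOcc_eq (s d : String) : bOcc s d = (OCC s.toList d.toList).map (Nat.cast) := by
  unfold bOcc OCC
  have hlen_s : PySem.Str.len s = (s.toList.length : Int) := by simp
  have hlen_d : PySem.Str.len d = (d.toList.length : Int) := by simp
  rw [hlen_s, hlen_d]
  by_cases hm : d.toList.length ≤ s.toList.length + 1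
  · rw [show (s.toList.length : Int) - d.toList.length + 1 =
        ((s.toList.length + 1 - d.toList.length : Nat) : Int) by omega,
      pyRange_zero_natCast, List.filter_map]
    congr 1
    conv_rhs => rw [show s.toList.length + 1 =
        (s.toList.length + 1 - d.toList.length) + d.toList.length by omega, List.range_add]
    rw [List.filter_append]
    have h2 : ((List.range d.toList.length).map
          (fun x => (s.toList.length + 1 - d.toList.length) + x)).filter
          (fun p => decide (d.toList <+: s.toList.drop p)) = [] := by
      rw [List.filter_eq_nil_iff]
      intro a ha
      simp only [List.mem_map, List.mem_range] at ha
      obtain ⟨x, hx, rfl⟩ := ha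
      simp only [decide_eq_true_eq]
      intro hpre
      have := hpre.length_le
      rw [List.length_drop] at this
      omega
    rw [h2, List.append_nil]
    apply List.filter_congr
    intro i hi
    rw [List.mem_range] at hi
    show (PySem.Str.slice s (some (i : Int)) (some ((i : Int) + (d.toList.length : Int))) == d)
        = decide (d.toList <+: s.toList.drop i)
    have hiff : PySem.Str.slice s (some (i : Int)) (some ((i : Int) + (d.toList.length : Int))) = d
        ↔ d.toList <+: s.toList.drop i := by
      rw [← String.toList_inj, PySem.Str.toList_slice, PySem.Chars.slice_eq_listSlice,
        PySem.List.slice_natCast_add]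
      constructor
      · intro h
        exact List.prefix_iff_eq_take.mpr h.symm
      · intro h
        exact (List.prefix_iff_eq_take.mp h).symm
    rw [beq_eq_decide]
    exact decide_eq_decide.mpr hiff
  · rw [PySem.List.pyRange_one_eq_nil (by omega)]
    have h2 : (List.range (s.toList.length + 1)).filter
        (fun p => decide (d.toList <+: s.toList.drop p)) = [] := by
      rw [List.filter_eq_nil_iff]
      intro a ha
      rw [List.mem_range] at ha
      simp only [decide_eq_true_eq]
      intro hpre
      have := hpre.length_le
      rw [List.length_drop] at this
      omega
    rw [h2]
    simp

-- dropping past a sorted list's j-th element = dropping j+1 elements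
theorem filter_gt_sorted {L : List Nat} (hs : L.Pairwise (· < ·)) {j : Nat} {a : Nat}
    (hj : L[j]? = some a) :
    L.filter (fun p => decide (a + 1 ≤ p)) = L.drop (j+1) := by
  obtain ⟨hjl, ha⟩ := List.getElem?_eq_some_iff.mp hj
  have hpw := List.pairwise_iff_getElem.mp hs
  conv_lhs => rw [← List.take_append_drop (j+1) L]
  rw [List.filter_append]
  have h1 : (L.take (j+1)).filter (fun p => decide (a + 1 ≤ p)) = [] := by
    rw [List.filter_eq_nil_iff]
    intro x hx
    obtain ⟨i, hi, hxi⟩ := List.mem_iff_getElem.mp hx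
    rw [List.getElem_take] at hxi
    have hij : i < j + 1 := by
      have := hi; rw [List.length_take] at this; omega
    have hxa : x ≤ a := by
      rcases Nat.lt_or_ge i j with h | h
      · have := hpw i j (by omega) hjl h
        omega
      · obtain rfl : i = j := by omega
        have : x = a := by rw [← hxi, ← ha]
        omega
    simp only [decide_eq_true_eq]
    omega
  have h2 : (L.drop (j+1)).filter (fun p => decide (a + 1 ≤ p)) = L.drop (j+1) := by
    rw [List.filter_eq_self]
    intro x hx
    obtain ⟨i, hi, hxi⟩ := List.mem_iff_getElem.mp hx
    rw [List.getElem_drop] at hxi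
    have hlt : a < x := by
      have := hpw j (j+1+i) hjl (by have := hi; rw [List.length_drop] at this; omega) (by omega)
      omega
    simp only [decide_eq_true_eq]
    omega
  rw [h1, h2, List.nil_append]

theorem pos_loop_eq (s d : String) : ∀ (c j k : Nat),
    (OCC s.toList d.toList).filter (fun p => decide (k ≤ p)) = (OCC s.toList d.toList).drop j →
    aFindLoop s d (c+1) ((k : Int) - 1) =
      match ((OCC s.toList d.toList).drop j)[c]? with
      | some p => PySem.Str.slice s none (some (p : Int))
      | none => s := by
  intro c
  induction c with
  | zero =>
      intro j k hinv
      simp only [aFindLoop]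
      rw [show (k : Int) - 1 + 1 = (k : Int) by ring, findFrom_occ s d k,
        find?_eq_head?_filter, hinv, List.head?_drop]
      cases hOj : (OCC s.toList d.toList)[j]? with
      | none =>
          rw [if_pos rfl, List.getElem?_drop,
            List.getElem?_eq_none (by have := List.getElem?_eq_none_iff.mp hOj; omega)]
      | some p =>
          rw [if_neg (by omega : ¬ ((p : Nat) : Int) = -1)]
          simp only [List.getElem?_drop, Nat.add_zero, hOj]
  | succ c ih =>
      intro j k hinv
      rw [aFindLoop]
      rw [show (k : Int) - 1 + 1 = (k : Int) by ring, findFrom_occ s d k,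
        find?_eq_head?_filter, hinv, List.head?_drop]
      cases hOj : (OCC s.toList d.toList)[j]? with
      | none =>
          rw [if_pos rfl, List.getElem?_drop,
            List.getElem?_eq_none (by have := List.getElem?_eq_none_iff.mp hOj; omega)]
      | some p =>
          rw [if_neg (by omega : ¬ ((p : Nat) : Int) = -1)]
          have hstep : ((p : Nat) : Int) = (((p+1 : Nat) : Int)) - 1 := by push_cast; ring
          dsimp only
          rw [hstep, ih (j+1) (p+1) (filter_gt_sorted (OCC_pairwise _ _) hOj),
            List.getElem?_drop, List.getElem?_drop, show j+1+c = j + (c+1) by omega]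

-- B's reversed scan of occ computes the same occurrence as A's bounded rfind
theorem bfind_bridge (s d : String) (b : Nat) :
    (bOcc s d).reverse.find? (fun q => q + PySem.Str.len d ≤ (b : Int)) =
      ((OCC s.toList d.toList).reverse.find?
        (fun p => decide (p + d.toList.length ≤ b))).map (fun p : Nat => (p : Int)) := by
  have hpred : ((fun q : Int => decide (q + PySem.Str.len d ≤ (b : Int))) ∘ (Nat.cast : Nat → Int))
      = (fun p : Nat => decide (p + d.toList.length ≤ b)) := by
    funext p
    simp only [Function.comp_apply]
    have hlen_d : PySem.Str.len d = (d.toList.length : Int) := by simp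
    rw [hlen_d, decide_eq_decide]
    omega
  rw [bOcc_eq, ← List.map_reverse, List.find?_map, hpred]

theorem neg_loop_eq (s d : String) : ∀ (c : Nat) (v : Nat), v ∈ OCC s.toList d.toList →
    aRFindLoop s d c (some (v : Int)) =
      bNegLoop s (bOcc s d) (PySem.Str.len d) c (v : Int) := by
  intro c
  induction c with
  | zero => intro v hv; rfl
  | succ c ih =>
      intro v hv
      obtain ⟨hvn, -⟩ := mem_OCC.mp hv
      simp only [aRFindLoop, bNegLoop]
      rw [rfindFrom_occ s d v hvn _ (Or.inr rfl), bfind_bridge s d v]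
      cases hf : (OCC s.toList d.toList).reverse.find?
          (fun p => decide (p + d.toList.length ≤ v)) with
      | none => simp
      | some p =>
          have hp : p ∈ OCC s.toList d.toList :=
            List.mem_reverse.mp (List.mem_of_find?_eq_some hf)
          dsimp only [Option.map_some]
          rw [if_neg (by omega : ¬ ((p : Nat) : Int) = -1)]
          exact ih p hp

-- ===== VERDICT (by name: the statement is the Claim_ definition above) =====
theorem substring_index_spec : Claim_equal_substring_index := by
  intro s d count _
  unfold Spec_substring_index substring_index substring_index_alt
  by_cases h0 : count = 0
  · simp [h0]
  · rw [if_neg h0, if_neg h0]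
    by_cases hpos : count > 0
    · rw [if_pos hpos, if_pos hpos]
      obtain ⟨c, hc⟩ : ∃ c, count.toNat = c + 1 := ⟨count.toNat - 1, by omega⟩
      have hcount : count = ((c+1 : Nat) : Int) := by omega
      have hA := pos_loop_eq s d c 0 0 (by simp)
      rw [List.drop_zero] at hA
      rw [hc, show (-1 : Int) = ((0 : Nat) : Int) - 1 by norm_num, hA]
      have hblen : (bOcc s d).length = (OCC s.toList d.toList).length := by
        rw [bOcc_eq, List.length_map]
      cases hOc : (OCC s.toList d.toList)[c]? with
      | none =>
          have hlen : (OCC s.toList d.toList).length ≤ c := List.getElem?_eq_none_iff.mp hOc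
          rw [if_pos (by rw [hblen]; omega)]
      | some p =>
          have hlen : c < (OCC s.toList d.toList).length :=
            (List.getElem?_eq_some_iff.mp hOc).1
          rw [if_neg (by rw [hblen]; omega)]
          have hidx : (count - 1).toNat = c := by omega
          rw [hidx, bOcc_eq, List.getElem?_map, hOc]
          rfl
    · have hneg : count < 0 := by omega
      rw [if_neg hpos, if_neg hpos]
      obtain ⟨c, hc⟩ : ∃ c, (-count).toNat = c + 1 := ⟨(-count).toNat - 1, by omega⟩
      rw [hc]
      have hn : PySem.Str.len s = (s.toList.length : Int) := by simp
      simp only [aRFindLoop, bNegLoop]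
      rw [rfindFrom_occ s d s.toList.length (le_refl _) none (Or.inl ⟨rfl, rfl⟩),
        hn, bfind_bridge s d s.toList.length]
      cases hf : (OCC s.toList d.toList).reverse.find?
          (fun p => decide (p + d.toList.length ≤ s.toList.length)) with
      | none => simp
      | some p =>
          have hp : p ∈ OCC s.toList d.toList :=
            List.mem_reverse.mp (List.mem_of_find?_eq_some hf)
          dsimp only [Option.map_some]
          rw [if_neg (by omega : ¬ ((p : Nat) : Int) = -1)]
          exact neg_loop_eq s d c p hp
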